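-- pv_equiv track=rewrite | github.com/Nghia03092004/nghia03092004.github.io | project_euler/problem_325/solution.py | floor_sum_quad
-- ===== SOURCE A (Python) =====
-- MOD = 282475249  # 7^10
--
-- inv2 = pow(2, -1, MOD)
--
-- inv6 = pow(6, -1, MOD)
--
-- def S1(n):
--     """sum_{x=0}^{n-1} x mod MOD"""
--     return n % MOD * ((n - 1) % MOD) % MOD * inv2 % MOD
--
-- def S2(n):
--     """sum_{x=0}^{n-1} x^2 mod MOD"""
--     return n % MOD * ((n - 1) % MOD) % MOD * ((2 * n - 1) % MOD) % MOD * inv6 % MOD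
--
-- def floor_sum_quad(N, a, b, m):
--     """
--     Compute mod MOD:
--     f0 = sum_{x=0}^{N-1} floor((ax+b)/m)
--     f1 = sum_{x=0}^{N-1} x * floor((ax+b)/m)
--     f2 = sum_{x=0}^{N-1} floor((ax+b)/m)^2
--     """
--     if N <= 0:
--         return (0, 0, 0)
--
--     if a >= m:
--         qa = a // m
--         g0, g1, g2 = floor_sum_quad(N, a % m, b, m)
--         s1, s2 = S1(N), S2(N)
--         qa_m = qa % MOD
--         f0 = (qa_m * s1 + g0) % MOD
--         f1 = (qa_m * s2 + g1) % MOD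
--         f2 = (qa_m * qa_m % MOD * s2 + 2 * qa_m * g1 + g2) % MOD
--         return (f0 % MOD, f1 % MOD, f2 % MOD)
--
--     if b >= m:
--         qb = b // m
--         g0, g1, g2 = floor_sum_quad(N, a, b % m, m)
--         qb_m, Nm = qb % MOD, N % MOD
--         f0 = (qb_m * Nm + g0) % MOD
--         f1 = (qb_m * S1(N) + g1) % MOD
--         f2 = (qb_m * qb_m % MOD * Nm + 2 * qb_m * g0 + g2) % MOD
--         return (f0 % MOD, f1 % MOD, f2 % MOD)
--
--     if a == 0:
--         return (0, 0, 0)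
--
--     M_val = (a * (N - 1) + b) // m
--     if M_val == 0:
--         return (0, 0, 0)
--
--     g0, g1, g2 = floor_sum_quad(M_val, m, m - b - 1, a)
--
--     Nm = (N - 1) % MOD
--     Mm = M_val % MOD
--     T = S1(N)
--
--     f0 = (Nm * Mm - g0) % MOD
--     f1 = (Mm * T - inv2 * (g2 + g0)) % MOD
--     f2 = (Nm * Mm % MOD * Mm - 2 * g1 - g0) % MOD
--
--     return (f0 % MOD, f1 % MOD, f2 % MOD)
-- ===== SOURCE B (Python) =====
-- MOD = 282475249  # 7^10
--
-- inv2 = pow(2, -1, MOD)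
--
-- inv6 = pow(6, -1, MOD)
--
-- def S1(n):
--     """sum_{x=0}^{n-1} x mod MOD"""
--     return n % MOD * ((n - 1) % MOD) % MOD * inv2 % MOD
--
-- def S2(n):
--     """sum_{x=0}^{n-1} x^2 mod MOD"""
--     return n % MOD * ((n - 1) % MOD) % MOD * ((2 * n - 1) % MOD) % MOD * inv6 % MOD
--
-- def floor_sum_quad(N, a, b, m):
--     """
--     Iterative two-phase version: a descent loop pushes, for each reduction
--     step, a tagged frame holding the constants of its affine back-substitution
--     onto an explicit stack; an unwind loop then pops the frames and applies the
--     transforms to the running triple (g0, g1, g2).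
--     """
--     stack = []
--     while True:
--         if N <= 0:
--             break
--         if a >= m:
--             stack.append(('A', a // m % MOD, S1(N), S2(N)))
--             a %= m
--             continue
--         if b >= m:
--             stack.append(('B', b // m % MOD, N % MOD, S1(N)))
--             b %= m
--             continue
--         if a == 0:
--             break
--         M_val = (a * (N - 1) + b) // m
--         if M_val == 0:
--             break
--         stack.append(('S', (N - 1) % MOD, M_val % MOD, S1(N)))
--         N, a, b, m = M_val, m, m - b - 1, a
--     g0, g1, g2 = 0, 0, 0
--     while stack:
--         tag, u, v, w = stack.pop()
--         if tag == 'A':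
--             g0, g1, g2 = ((u * v + g0) % MOD,
--                           (u * w + g1) % MOD,
--                           (u * u % MOD * w + 2 * u * g1 + g2) % MOD)
--         elif tag == 'B':
--             g0, g1, g2 = ((u * v + g0) % MOD,
--                           (u * w + g1) % MOD,
--                           (u * u % MOD * v + 2 * u * g0 + g2) % MOD)
--         else:
--             g0, g1, g2 = ((u * v - g0) % MOD,
--                           (v * w - inv2 * (g2 + g0)) % MOD,
--                           (u * v % MOD * v - 2 * g1 - g0) % MOD)
--     return (g0, g1, g2)
-- ===== Notes on version B (the rewrite author's own statement) =====
-- stated objective: alternative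
-- what changed: Replaces A's threefold recursion by an explicit two-phase loop: a descent loop that pushes tagged frames holding each reduction's back-substitution constants onto a stack, then an unwind loop popping the frames and applying the affine transforms to the running (g0,g1,g2) triple.
import Mathlib
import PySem

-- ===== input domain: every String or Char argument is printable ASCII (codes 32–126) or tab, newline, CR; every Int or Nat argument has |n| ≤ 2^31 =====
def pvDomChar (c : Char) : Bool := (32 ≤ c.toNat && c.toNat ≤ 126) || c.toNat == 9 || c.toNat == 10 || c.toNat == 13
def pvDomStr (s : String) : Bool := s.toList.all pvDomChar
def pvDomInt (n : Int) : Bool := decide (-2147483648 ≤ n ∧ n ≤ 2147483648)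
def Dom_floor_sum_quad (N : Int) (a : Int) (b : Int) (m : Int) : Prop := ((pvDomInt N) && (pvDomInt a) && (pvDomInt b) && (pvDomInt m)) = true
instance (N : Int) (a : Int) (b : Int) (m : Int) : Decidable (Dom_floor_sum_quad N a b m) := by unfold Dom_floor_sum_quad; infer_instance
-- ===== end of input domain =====

-- B replaces A's threefold recursion by an explicit descent loop that records tagged
-- back-substitution frames on a stack and a separate unwind loop (same values, different
-- decomposition; objective: alternative).

-- ===== PORT A =====
def MOD : Int := 282475249  -- 7^10

def inv2 : Int := 141237625  -- pow(2, -1, MOD)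

def inv6 : Int := 235396041  -- pow(6, -1, MOD)

def S1 (n : Int) : Int :=
  PySem.Int.mod (PySem.Int.mod (PySem.Int.mod n MOD * PySem.Int.mod (n - 1) MOD) MOD * inv2) MOD

def S2 (n : Int) : Int :=
  PySem.Int.mod (PySem.Int.mod (PySem.Int.mod (PySem.Int.mod n MOD * PySem.Int.mod (n - 1) MOD) MOD * PySem.Int.mod (2 * n - 1) MOD) MOD * inv6) MOD

-- fuel guard for totality only: it bounds the recursion depth whenever m ≥ 1 (proved below);
-- for m ≤ 0 with N > 0 the Python recursion never returns (excluded by Pre_).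
def pvFuel (a b m : Int) : Nat :=
  3 * m.toNat + (if m ≤ a then 1 else 0) + (if m ≤ b then 1 else 0) + 1

def goA : Nat → Int → Int → Int → Int → Option (Int × Int × Int)
  | 0, _, _, _, _ => none
  | fuel + 1, N, a, b, m =>
    if N ≤ 0 then some (0, 0, 0)
    else if m ≤ a then
      let qa := PySem.Int.floordiv a m
      match goA fuel N (PySem.Int.mod a m) b m with
      | none => none
      | some (g0, g1, g2) =>
        let s1 := S1 N
        let s2 := S2 N
        let qa_m := PySem.Int.mod qa MOD
        let f0 := PySem.Int.mod (qa_m * s1 + g0) MOD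
        let f1 := PySem.Int.mod (qa_m * s2 + g1) MOD
        let f2 := PySem.Int.mod (PySem.Int.mod (qa_m * qa_m) MOD * s2 + 2 * qa_m * g1 + g2) MOD
        some (PySem.Int.mod f0 MOD, PySem.Int.mod f1 MOD, PySem.Int.mod f2 MOD)
    else if m ≤ b then
      let qb := PySem.Int.floordiv b m
      match goA fuel N a (PySem.Int.mod b m) m with
      | none => none
      | some (g0, g1, g2) =>
        let qb_m := PySem.Int.mod qb MOD
        let Nm := PySem.Int.mod N MOD
        let f0 := PySem.Int.mod (qb_m * Nm + g0) MOD
        let f1 := PySem.Int.mod (qb_m * S1 N + g1) MOD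
        let f2 := PySem.Int.mod (PySem.Int.mod (qb_m * qb_m) MOD * Nm + 2 * qb_m * g0 + g2) MOD
        some (PySem.Int.mod f0 MOD, PySem.Int.mod f1 MOD, PySem.Int.mod f2 MOD)
    else if a = 0 then some (0, 0, 0)
    else
      let M_val := PySem.Int.floordiv (a * (N - 1) + b) m
      if M_val = 0 then some (0, 0, 0)
      else
        match goA fuel M_val m (m - b - 1) a with
        | none => none
        | some (g0, g1, g2) =>
          let Nm := PySem.Int.mod (N - 1) MOD
          let Mm := PySem.Int.mod M_val MOD
          let T := S1 N
          let f0 := PySem.Int.mod (Nm * Mm - g0) MOD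
          let f1 := PySem.Int.mod (Mm * T - inv2 * (g2 + g0)) MOD
          let f2 := PySem.Int.mod (PySem.Int.mod (Nm * Mm) MOD * Mm - 2 * g1 - g0) MOD
          some (PySem.Int.mod f0 MOD, PySem.Int.mod f1 MOD, PySem.Int.mod f2 MOD)

def floor_sum_quad (N : Int) (a : Int) (b : Int) (m : Int) : Int × Int × Int :=
  (goA (pvFuel a b m) N a b m).getD (0, 0, 0)

-- ===== PORT B =====
inductive PvFrame : Type
  | fa : Int → Int → Int → PvFrame
  | fb : Int → Int → Int → PvFrame
  | fs : Int → Int → Int → PvFrame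
deriving DecidableEq, Repr

def pvApply (g : Int × Int × Int) (fr : PvFrame) : Int × Int × Int :=
  match g, fr with
  | (g0, g1, g2), .fa u v w =>
      (PySem.Int.mod (u * v + g0) MOD,
       PySem.Int.mod (u * w + g1) MOD,
       PySem.Int.mod (PySem.Int.mod (u * u) MOD * w + 2 * u * g1 + g2) MOD)
  | (g0, g1, g2), .fb u v w =>
      (PySem.Int.mod (u * v + g0) MOD,
       PySem.Int.mod (u * w + g1) MOD,
       PySem.Int.mod (PySem.Int.mod (u * u) MOD * v + 2 * u * g0 + g2) MOD)
  | (g0, g1, g2), .fs u v w =>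
      (PySem.Int.mod (u * v - g0) MOD,
       PySem.Int.mod (v * w - inv2 * (g2 + g0)) MOD,
       PySem.Int.mod (PySem.Int.mod (u * v) MOD * v - 2 * g1 - g0) MOD)

-- descent phase: same fuel guard for totality (the while loop never exits for m ≤ 0, N > 0)
def goB : Nat → Int → Int → Int → Int → List PvFrame → Option (List PvFrame)
  | 0, _, _, _, _, _ => none
  | fuel + 1, N, a, b, m, stack =>
    if N ≤ 0 then some stack
    else if m ≤ a then
      goB fuel N (PySem.Int.mod a m) b m
        (.fa (PySem.Int.mod (PySem.Int.floordiv a m) MOD) (S1 N) (S2 N) :: stack)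
    else if m ≤ b then
      goB fuel N a (PySem.Int.mod b m) m
        (.fb (PySem.Int.mod (PySem.Int.floordiv b m) MOD) (PySem.Int.mod N MOD) (S1 N) :: stack)
    else if a = 0 then some stack
    else
      let M_val := PySem.Int.floordiv (a * (N - 1) + b) m
      if M_val = 0 then some stack
      else goB fuel M_val m (m - b - 1) a
        (.fs (PySem.Int.mod (N - 1) MOD) (PySem.Int.mod M_val MOD) (S1 N) :: stack)

-- unwind phase: pop frames (stack head = last pushed) and apply each transform
def floor_sum_quad_alt (N : Int) (a : Int) (b : Int) (m : Int) : Int × Int × Int :=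
  match goB (pvFuel a b m) N a b m [] with
  | none => (0, 0, 0)
  | some st => st.foldl pvApply (0, 0, 0)

-- ===== PRECONDITION & SPEC =====
-- Pre_ excludes exactly the inputs on which A never returns: for N > 0 Python raises
-- ZeroDivisionError (m = 0) or RecursionError (m < 0, unbounded recursion).
def Pre_floor_sum_quad (N : Int) (a : Int) (b : Int) (m : Int) : Prop := N ≤ 0 ∨ 1 ≤ m
instance (N : Int) (a : Int) (b : Int) (m : Int) : Decidable (Pre_floor_sum_quad N a b m) := by
  unfold Pre_floor_sum_quad; infer_instance

def pvWitness_floor_sum_quad : Int × Int × Int × Int := (10, 3, 4, 5)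

def Spec_floor_sum_quad (N : Int) (a : Int) (b : Int) (m : Int) (out : Int × Int × Int) : Prop := out = floor_sum_quad_alt N a b m
instance (N : Int) (a : Int) (b : Int) (m : Int) (out : Int × Int × Int) : Decidable (Spec_floor_sum_quad N a b m out) := by unfold Spec_floor_sum_quad; infer_instance

-- ===== CLAIM (what is proved, stated in full; the proofs are below) =====
def Claim_equal_floor_sum_quad : Prop := ∀ (N : Int) (a : Int) (b : Int) (m : Int), Dom_floor_sum_quad N a b m → Pre_floor_sum_quad N a b m → Spec_floor_sum_quad N a b m (floor_sum_quad N a b m)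

-- ===== LEMMAS AND PROOFS =====
lemma pv_mod_mod (x : Int) :
    PySem.Int.mod (PySem.Int.mod x MOD) MOD = PySem.Int.mod x MOD := by
  have h : (0 : Int) < MOD := by decide
  simp only [PySem.Int.mod_eq_emod_of_pos h]
  exact Int.emod_emod_of_dvd x dvd_rfl

-- the stack machine simulates the recursion: running B's descent with any initial stack
-- and then unwinding computes A's value back-substituted through that stack
lemma pv_sim : ∀ (fuel : Nat) (N a b m : Int) (st : List PvFrame),
    (goB fuel N a b m st).map (fun s => s.foldl pvApply (0, 0, 0))
      = (goA fuel N a b m).map (fun r => st.foldl pvApply r) := by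
  intro fuel
  induction fuel with
  | zero => intro N a b m st; simp [goA, goB]
  | succ f ih =>
    intro N a b m st
    rw [goA, goB]
    by_cases h1 : N ≤ 0
    · simp [h1]
    · by_cases h2 : m ≤ a
      · simp only [if_neg h1, if_pos h2]
        rw [ih]
        cases hg : goA f N (PySem.Int.mod a m) b m with
        | none => simp
        | some g =>
          obtain ⟨g0, g1, g2⟩ := g
          simp [List.foldl, pvApply, pv_mod_mod]
      · by_cases h3 : m ≤ b
        · simp only [if_neg h1, if_neg h2, if_pos h3]
          rw [ih]
          cases hg : goA f N a (PySem.Int.mod b m) m with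
          | none => simp
          | some g =>
            obtain ⟨g0, g1, g2⟩ := g
            simp [List.foldl, pvApply, pv_mod_mod]
        · by_cases h4 : a = 0
          · simp only [if_neg h1, if_neg h2, if_neg h3, if_pos h4]
            simp
          · by_cases h5 : PySem.Int.floordiv (a * (N - 1) + b) m = 0
            · simp [h1, h2, h3, h4, h5]
            · simp only [if_neg h1, if_neg h2, if_neg h3, if_neg h4, if_neg h5]
              rw [ih]
              cases hg : goA f (PySem.Int.floordiv (a * (N - 1) + b) m) m (m - b - 1) a with
              | none => simp
              | some g =>
                obtain ⟨g0, g1, g2⟩ := g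
                simp [List.foldl, pvApply, pv_mod_mod]

-- pvFuel really does bound A's recursion depth for m ≥ 1
lemma pv_suff : ∀ (fuel : Nat) (N a b m : Int), 1 ≤ m → pvFuel a b m ≤ fuel →
    (goA fuel N a b m).isSome := by
  intro fuel
  induction fuel with
  | zero =>
    intro N a b m _ hf
    exfalso; unfold pvFuel at hf; omega
  | succ f ih =>
    intro N a b m hm hf
    rw [goA]
    by_cases h1 : N ≤ 0
    · simp [h1]
    · by_cases h2 : m ≤ a
      · simp only [if_neg h1, if_pos h2]
        have hlt : PySem.Int.mod a m < m := by
          rw [PySem.Int.mod_eq_emod_of_pos (by omega)]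
          exact Int.emod_lt_of_pos _ (by omega)
        have hfc : pvFuel (PySem.Int.mod a m) b m ≤ f := by
          unfold pvFuel at hf ⊢
          rw [if_pos h2] at hf
          rw [if_neg (not_le.mpr hlt)]
          omega
        have hs := ih N (PySem.Int.mod a m) b m hm hfc
        cases hg : goA f N (PySem.Int.mod a m) b m with
        | none => rw [hg] at hs; simp at hs
        | some g => obtain ⟨g0, g1, g2⟩ := g; simp
      · by_cases h3 : m ≤ b
        · simp only [if_neg h1, if_neg h2, if_pos h3]
          have hlt : PySem.Int.mod b m < m := by
            rw [PySem.Int.mod_eq_emod_of_pos (by omega)]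
            exact Int.emod_lt_of_pos _ (by omega)
          have hfc : pvFuel a (PySem.Int.mod b m) m ≤ f := by
            unfold pvFuel at hf ⊢
            rw [if_neg h2, if_pos h3] at hf
            rw [if_neg h2, if_neg (not_le.mpr hlt)]
            omega
          have hs := ih N a (PySem.Int.mod b m) m hm hfc
          cases hg : goA f N a (PySem.Int.mod b m) m with
          | none => rw [hg] at hs; simp at hs
          | some g => obtain ⟨g0, g1, g2⟩ := g; simp
        · by_cases h4 : a = 0
          · simp only [if_neg h1, if_neg h2, if_neg h3, if_pos h4]
            simp
          · set M_val := PySem.Int.floordiv (a * (N - 1) + b) m with hM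
            by_cases h5 : M_val = 0
            · simp [h1, h2, h3, h4, h5]
            · simp only [if_neg h1, if_neg h2, if_neg h3, if_neg h4, if_neg h5]
              rcases lt_or_gt_of_ne h4 with ha | ha
              · -- a < 0 : M_val < 0, child returns at its base case
                have hnum : a * (N - 1) + b < 1 * m := by
                  have h1' : a * (N - 1) ≤ 0 :=
                    mul_nonpos_of_nonpos_of_nonneg (le_of_lt ha) (by omega)
                  omega
                have hMlt : M_val < 1 := by
                  rw [hM]
                  exact (PySem.Int.floordiv_lt_iff_lt_mul (by omega)).mpr hnum
                have hMneg : M_val ≤ 0 := by omega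
                obtain ⟨f', rfl⟩ : ∃ f', f = f' + 1 := by
                  refine ⟨f - 1, ?_⟩
                  unfold pvFuel at hf; omega
                rw [goA]
                simp [hMneg]
              · -- 1 ≤ a : child's modulus a is strictly smaller
                have hfc : pvFuel m (m - b - 1) a ≤ f := by
                  unfold pvFuel at hf ⊢
                  rw [if_neg h2, if_neg h3] at hf
                  split_ifs <;> omega
                have hs := ih M_val m (m - b - 1) a (by omega) hfc
                cases hg : goA f M_val m (m - b - 1) a with
                | none => rw [hg] at hs; simp at hs
                | some g => obtain ⟨g0, g1, g2⟩ := g; simp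

-- ===== VERDICT (by name: the statement is the Claim_ definition above) =====
theorem floor_sum_quad_spec : Claim_equal_floor_sum_quad := by
  intro N a b m _ hpre
  unfold Spec_floor_sum_quad floor_sum_quad floor_sum_quad_alt
  rcases hpre with hN | hm
  · obtain ⟨f, hfeq⟩ : ∃ f, pvFuel a b m = f + 1 :=
      ⟨3 * m.toNat + (if m ≤ a then 1 else 0) + (if m ≤ b then 1 else 0), rfl⟩
    rw [hfeq, goA, goB]
    simp [hN]
  · have hsim := pv_sim (pvFuel a b m) N a b m []
    have hs := pv_suff (pvFuel a b m) N a b m hm le_rfl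
    cases hg : goA (pvFuel a b m) N a b m with
    | none => rw [hg] at hs; simp at hs
    | some r =>
      rw [hg] at hsim
      cases hb : goB (pvFuel a b m) N a b m [] with
      | none => rw [hb] at hsim; simp at hsim
      | some st =>
        rw [hb] at hsim
        simp only [Option.map_some, Option.some.injEq, List.foldl_nil] at hsim
        simp [hsim]
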